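-- pv_equiv track=rewrite | github.com/gadjishka/course-internship | Task_4.py | bananas
-- ===== SOURCE A (Python) =====
-- from itertools import combinations
--
-- def bananas(s) -> set:
--     result = set()
--     tmp = list(combinations(range(len(s)), 6))
--     ban = tuple('banana')
--     for _ in tmp:
--         f = True
--         for i in range(len(_)):
--             if(s[_[i]] != ban[i]):
--                 f = False
--                 break
--         if f:
--             ans = ''
--             for i in range(len(s)):
--                 if i in _:
--                     ans += s[i]
--                 else:
--                     ans += '-'
--             result.add(ans)
--     return result
-- ===== SOURCE B (Python) =====
-- def bananas(s) -> set:
--     ban = 'banana'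
--     n = len(s)
--
--     def go(start, k):
--         # all increasing index lists t with s[t[j]] == ban[k+j], drawn from positions >= start
--         if k == len(ban):
--             return [[]]
--         out = []
--         for j in range(start, n):
--             if s[j] == ban[k]:
--                 for tail in go(j + 1, k + 1):
--                     out.append([j] + tail)
--         return out
--
--     def mask(t):
--         chars = ['-'] * n
--         for j in t:
--             chars[j] = s[j]
--         return ''.join(chars)
--
--     result = set()
--     for t in go(0, 0):
--         result.add(mask(t))
--     return result
-- ===== Notes on version B (the rewrite author's own statement) =====
-- stated objective: faster
-- what changed: B replaces A's scan of all C(n,6) index combinations (each re-checked letter by letter and re-masked) by a recursive search that extends only prefixes already matching 'banana', so only matching index tuples are ever materialized.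
import Mathlib
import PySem

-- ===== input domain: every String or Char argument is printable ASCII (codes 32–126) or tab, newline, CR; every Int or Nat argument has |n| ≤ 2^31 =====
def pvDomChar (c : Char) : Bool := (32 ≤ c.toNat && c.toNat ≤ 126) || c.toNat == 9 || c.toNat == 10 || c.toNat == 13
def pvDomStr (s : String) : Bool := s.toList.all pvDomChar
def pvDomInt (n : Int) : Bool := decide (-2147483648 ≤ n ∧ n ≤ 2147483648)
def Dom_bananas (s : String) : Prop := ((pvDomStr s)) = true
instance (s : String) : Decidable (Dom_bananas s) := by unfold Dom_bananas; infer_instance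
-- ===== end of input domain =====

-- B replaces A's scan of all C(n,6) index combinations by a recursive search that
-- extends only matching prefixes (objective: faster, asymptotically).

-- ===== PORT A =====
-- itertools.combinations(range(n), 6), lexicographic order, over an explicit index list
def pvCombos : List Nat → Nat → List (List Nat)
  | _, 0 => [[]]
  | [], _ + 1 => []
  | x :: xs, k + 1 => ((pvCombos xs k).map (x :: ·)) ++ pvCombos xs (k + 1)

def pvBan : List Char := ['b', 'a', 'n', 'a', 'n', 'a']

-- A's inner flag loop: walks the tuple against ban, breaking at the first mismatch
def pvCheck (cs : List Char) : List Nat → List Char → Bool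
  | i :: is, c :: bs => if cs.getD i ' ' == c then pvCheck cs is bs else false
  | _, _ => true

-- A's answer-building loop: for i in range(len(s)): ans += s[i] if i in _ else '-'
def pvBuild (cs : List Char) (t : List Nat) : List Char :=
  (List.range cs.length).foldl
    (fun a i => a ++ [if t.contains i then cs.getD i ' ' else '-']) []

def bananas (s : String) : List String :=
  let cs := s.toList
  let tmp := pvCombos (List.range cs.length) 6
  tmp.foldl
    (fun r t =>
      if pvCheck cs t pvBan then PySem.Set.add r (String.ofList (pvBuild cs t)) else r)
    PySem.Set.empty

-- ===== PORT B =====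
-- B's recursive search: indices j ≥ start (given as the remaining index list) at which
-- the rest of 'banana' can be spelled; only matching letters are extended.
def pvGo (cs : List Char) : List Nat → List Char → List (List Nat)
  | _, [] => [[]]
  | [], _ :: _ => []
  | j :: rest, b :: bs =>
      (if cs.getD j ' ' == b then (pvGo cs rest bs).map (j :: ·) else []) ++
        pvGo cs rest (b :: bs)

-- B's mask: start from all dashes and write back the chosen positions
def pvMask (cs : List Char) (t : List Nat) : List Char :=
  t.foldl (fun m j => m.set j (cs.getD j ' ')) (List.replicate cs.length '-')

def bananas_alt (s : String) : List String :=
  let cs := s.toList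
  ((pvGo cs (List.range cs.length) pvBan).map
      (fun t => String.ofList (pvMask cs t))).foldl PySem.Set.add PySem.Set.empty

-- ===== PRECONDITION & SPEC =====
def Spec_bananas (s : String) (out : List String) : Prop := out = bananas_alt s
instance (s : String) (out : List String) : Decidable (Spec_bananas s out) := by
  unfold Spec_bananas; infer_instance

-- ===== CLAIM (what is proved, stated in full; the proofs are below) =====
def Claim_equal_bananas : Prop := ∀ (s : String), Dom_bananas s → Spec_bananas s (bananas s)

-- ===== LEMMAS AND PROOFS =====

-- Filtering the combinations of an index list by pvCheck is exactly pvGo's search.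
theorem filter_combos (cs : List Char) (l : List Nat) :
    ∀ bs : List Char,
      (pvCombos l bs.length).filter (fun t => pvCheck cs t bs) = pvGo cs l bs := by
  induction l with
  | nil =>
      intro bs
      cases bs <;> simp [pvCombos, pvGo, pvCheck]
  | cons j rest ih =>
      intro bs
      cases bs with
      | nil => simp [pvCombos, pvGo, pvCheck]
      | cons b bs' =>
          simp only [List.length_cons, pvCombos, pvGo, List.filter_append, List.filter_map]
          have h2 : List.filter (fun t => pvCheck cs t (b :: bs')) (pvCombos rest (bs'.length + 1))
              = pvGo cs rest (b :: bs') := ih (b :: bs')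
          rw [h2]
          congr 1
          by_cases h : cs.getD j ' ' = b
          · simp only [List.getD] at h
            simp [Function.comp_def, pvCheck, h, ih bs']
          · simp only [List.getD] at h
            simp [Function.comp_def, pvCheck, h]

theorem set_map_range (n : Nat) (g : Nat → Char) (j : Nat) (v : Char) :
    ((List.range n).map g).set j v
      = (List.range n).map (fun i => if i = j then v else g i) := by
  apply List.ext_getElem
  · simp
  · intro i h1 h2
    simp only [List.getElem_set, List.getElem_map, List.getElem_range]
    split_ifs with ha hb hb
    · rfl
    · exact absurd ha.symm hb
    · exact absurd hb.symm ha
    · rfl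

-- the write-back fold, started from any range-indexed list, is a pointwise overwrite
theorem foldl_set_map_range (cs : List Char) (n : Nat) :
    ∀ (t : List Nat) (g : Nat → Char),
      t.foldl (fun m j => m.set j (cs.getD j ' ')) ((List.range n).map g)
        = (List.range n).map (fun i => if i ∈ t then cs.getD i ' ' else g i) := by
  intro t
  induction t with
  | nil => intro g; simp
  | cons j rest ih =>
      intro g
      simp only [List.foldl_cons]
      rw [set_map_range, ih]
      apply List.map_congr_left
      intro i _
      by_cases hmem : i ∈ rest
      · simp [hmem]
      · by_cases hj : i = j
        · subst hj; simp [hmem]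
        · simp [hmem, hj]

theorem foldl_append_map {α β : Type} (f : α → β) (l : List α) :
    ∀ acc : List β, l.foldl (fun a i => a ++ [f i]) acc = acc ++ l.map f := by
  induction l with
  | nil => simp
  | cons x xs ih => intro acc; simp [List.foldl_cons, ih]

-- A's per-position build equals B's write-back mask, for every index list.
theorem build_eq_mask (cs : List Char) (t : List Nat) :
    pvBuild cs t = pvMask cs t := by
  have hb : pvBuild cs t =
      (List.range cs.length).map (fun i => if t.contains i then cs.getD i ' ' else '-') := by
    simpa [pvBuild] using foldl_append_map
      (fun i => if t.contains i then cs.getD i ' ' else '-') (List.range cs.length) []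
  have hm : pvMask cs t =
      (List.range cs.length).map (fun i => if i ∈ t then cs.getD i ' ' else '-') := by
    have hrep : (List.replicate cs.length '-') = (List.range cs.length).map (fun _ => '-') := by
      simp [List.map_const']
    rw [pvMask, hrep, foldl_set_map_range]
  rw [hb, hm]
  simp

theorem foldl_if_filter {α β : Type} (p : α → Bool) (g : β → α → β) :
    ∀ (l : List α) (r : β),
      l.foldl (fun r t => if p t then g r t else r) r = (l.filter p).foldl g r := by
  intro l
  induction l with
  | nil => intro r; rfl
  | cons x xs ih =>
      intro r
      by_cases h : p x <;> simp [h, ih]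

-- ===== VERDICT (by name: the statement is the Claim_ definition above) =====
theorem bananas_spec : Claim_equal_bananas := by
  intro s _
  unfold Spec_bananas bananas bananas_alt
  set cs := s.toList with hcs
  rw [foldl_if_filter (fun t => pvCheck cs t pvBan)
      (fun r t => PySem.Set.add r (String.ofList (pvBuild cs t)))]
  have h6 : (6 : Nat) = pvBan.length := rfl
  rw [h6, filter_combos cs (List.range cs.length) pvBan]
  rw [List.foldl_map]
  simp only [build_eq_mask]
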